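-- pv_equiv track=rewrite | github.com/etvan13/Spacetime-Memory-Lattice | Terminal/terminal.py | coord_conv
-- ===== SOURCE A (Python) =====
-- def coord_conv(number):
--     number %= (60**6)
--     digits = []
--     while number > 0:
--         digits.append(number % 60)
--         number //= 60
--     while len(digits) < 6: digits.append(0)
--     return digits
-- ===== SOURCE B (Python) =====
-- def coord_conv(number):
--     number %= (60**6)
--     return [(number // (60**i)) % 60 for i in range(6)]
-- ===== Notes on version B (the rewrite author's own statement) =====
-- stated objective: simpler
-- what changed: Replaces the while-loop accumulator plus separate pad-to-6 loop with direct positional extraction of each of the six base-60 digits in one comprehension.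
import Mathlib
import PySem

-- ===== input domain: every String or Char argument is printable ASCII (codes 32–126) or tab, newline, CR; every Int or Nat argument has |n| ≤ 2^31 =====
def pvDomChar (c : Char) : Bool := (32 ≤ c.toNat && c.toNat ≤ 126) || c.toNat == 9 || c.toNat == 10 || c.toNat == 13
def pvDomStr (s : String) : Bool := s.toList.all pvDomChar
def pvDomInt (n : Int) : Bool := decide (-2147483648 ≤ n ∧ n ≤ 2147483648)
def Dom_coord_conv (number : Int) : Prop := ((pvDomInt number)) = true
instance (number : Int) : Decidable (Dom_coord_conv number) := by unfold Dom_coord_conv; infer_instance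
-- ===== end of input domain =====

-- B replaces A's digit-accumulating while loop and separate pad loop with direct
-- positional extraction of the six base-60 digits (simpler decomposition; same cost).

-- ===== PORT A =====
-- the 'while number > 0' loop: append number % 60, number //= 60
def coordLoopA (n : Int) (digits : List Int) : List Int :=
  if 0 < n then
    coordLoopA (PySem.Int.floordiv n 60) (digits ++ [PySem.Int.mod n 60])
  else digits
termination_by n.toNat
decreasing_by
  rw [PySem.Int.floordiv_eq_ediv_of_pos (by omega : (0:Int) < 60)]
  omega

-- the 'while len(digits) < 6' pad loop
def padLoopA (digits : List Int) : List Int :=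
  if digits.length < 6 then padLoopA (digits ++ [0]) else digits
termination_by 6 - digits.length
decreasing_by simp; omega

def coord_conv (number : Int) : List Int :=
  padLoopA (coordLoopA (PySem.Int.mod number (60 ^ 6)) [])

-- ===== PORT B =====
def coord_conv_alt (number : Int) : List Int :=
  let m := PySem.Int.mod number (60 ^ 6)
  (List.range 6).map (fun i => PySem.Int.mod (PySem.Int.floordiv m ((60 : Int) ^ i)) 60)

-- ===== PRECONDITION & SPEC =====
def Spec_coord_conv (number : Int) (out : List Int) : Prop := out = coord_conv_alt number
instance (number : Int) (out : List Int) : Decidable (Spec_coord_conv number out) := by unfold Spec_coord_conv; infer_instance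

-- ===== CLAIM (what is proved, stated in full; the proofs are below) =====
def Claim_equal_coord_conv : Prop := ∀ (number : Int), Dom_coord_conv number → Spec_coord_conv number (coord_conv number)

-- ===== LEMMAS AND PROOFS =====

-- accumulator lemma for A's digit loop
theorem coordLoopA_acc (n : Int) (acc : List Int) :
    coordLoopA n acc = acc ++ coordLoopA n [] := by
  by_cases h : 0 < n
  · rw [coordLoopA, if_pos h]
    conv_rhs => rw [coordLoopA, if_pos h]
    rw [coordLoopA_acc (PySem.Int.floordiv n 60) (acc ++ [PySem.Int.mod n 60]),
      coordLoopA_acc (PySem.Int.floordiv n 60) ([] ++ [PySem.Int.mod n 60])]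
    simp
  · rw [coordLoopA, if_neg h]
    conv_rhs => rw [coordLoopA, if_neg h]
    simp
termination_by n.toNat
decreasing_by
  all_goals
    rw [PySem.Int.floordiv_eq_ediv_of_pos (by omega : (0:Int) < 60)]
    omega

-- A's pad loop pads with zeros up to length 6
theorem padLoopA_eq (ds : List Int) :
    padLoopA ds = ds ++ List.replicate (6 - ds.length) 0 := by
  fun_induction padLoopA ds with
  | case1 ds h ih =>
    rw [ih, List.append_assoc]
    congr 1
    have h6 : 6 - ds.length = (6 - (ds.length + 1)) + 1 := by omega
    simp [h6, List.replicate_succ]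
  | case2 ds h =>
    have : 6 - ds.length = 0 := by omega
    simp [this]

-- the digit loop, padded to k, equals positional extraction (ediv/emod form)
theorem coordLoopA_digits (k : Nat) :
    ∀ n : Int, 0 ≤ n → n < 60 ^ k →
      coordLoopA n [] ++ List.replicate (k - (coordLoopA n []).length) 0 =
        (List.range k).map (fun i => (n / 60 ^ i) % 60) := by
  induction k with
  | zero =>
    intro n h0 hk
    have hn : n = 0 := by omega
    subst hn
    rw [coordLoopA]
    simp
  | succ k ih =>
    intro n h0 hk
    rcases lt_or_eq_of_le h0 with hpos | hz
    · -- n > 0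
      have h60 : (0:Int) < 60 := by omega
      rw [coordLoopA, if_pos hpos, coordLoopA_acc,
        PySem.Int.floordiv_eq_ediv_of_pos h60, PySem.Int.mod_eq_emod_of_pos h60]
      have hq0 : 0 ≤ n / 60 := Int.ediv_nonneg h0 (by omega)
      have hqlt : n / 60 < 60 ^ k := by
        rw [Int.ediv_lt_iff_lt_mul h60]
        calc n < 60 ^ (k + 1) := hk
          _ = 60 ^ k * 60 := by ring
      have hrec := ih (n / 60) hq0 hqlt
      have hlen : (k + 1) - ([] ++ [n % 60] ++ coordLoopA (n / 60) []).length
          = k - (coordLoopA (n / 60) []).length := by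
        simp
      rw [hlen]
      rw [List.range_succ_eq_map]
      simp only [List.map_cons, List.map_map, List.nil_append,
        List.cons_append]
      rw [hrec]
      congr 1
      · simp
      · apply List.map_congr_left
        intro i _
        simp only [Function.comp]
        congr 1
        rw [pow_succ']
        rw [Int.ediv_ediv_of_nonneg (by positivity : (0:Int) ≤ 60)]
    · -- n = 0
      subst hz
      rw [coordLoopA]
      simp only [lt_self_iff_false, if_false, List.nil_append, List.length_nil,
        Nat.sub_zero]
      apply List.ext_getElem
      · simp
      · intro i h1 h2
        simp

-- ===== VERDICT (by name: the statement is the Claim_ definition above) =====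
theorem coord_conv_spec : Claim_equal_coord_conv := by
  intro number _
  unfold Spec_coord_conv coord_conv coord_conv_alt
  have hM : (0:Int) < 60 ^ 6 := by positivity
  set m := PySem.Int.mod number (60 ^ 6) with hm
  have hme : m = number % (60 ^ 6) := by
    rw [hm, PySem.Int.mod_eq_emod_of_pos hM]
  have h0 : 0 ≤ m := by rw [hme]; exact Int.emod_nonneg _ (by omega)
  have hlt : m < 60 ^ 6 := by rw [hme]; exact Int.emod_lt_of_pos _ hM
  rw [padLoopA_eq, coordLoopA_digits 6 m h0 hlt]
  apply List.map_congr_left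
  intro i _
  have hp : (0:Int) < 60 ^ i := by positivity
  rw [PySem.Int.floordiv_eq_ediv_of_pos hp,
    PySem.Int.mod_eq_emod_of_pos (by omega : (0:Int) < 60)]
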